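-- pv_equiv track=rewrite | github.com/k90661848-svg/jordan-home-finder | JordanHomeFinder/app.py | parse_location_from_text
-- ===== SOURCE A (Python) =====
-- LOCATION_SYNONYMS = {
--     "jabal amman": "Sweifieh",
--     "rainbow street": "Sweifieh",
--     "rainbow st": "Sweifieh",
--     "jabal": "Sweifieh",
--     "downtown amman": "Abdali",
--     "airport": "Airport Road",
--     "abdali": "Abdali",
--     "abdoun": "Abdoun",
--     "dabouq": "Dabouq",
--     "sweifieh": "Sweifieh",
--     "khalda": "Khalda",
--     "deir ghbar": "Deir Ghbar",
-- }
--
-- def parse_location_from_text(text: str, properties: list):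
--     t = text.lower()
--     for phrase, actual_loc in LOCATION_SYNONYMS.items():
--         if phrase in t:
--             return actual_loc
--     known_locations = sorted(
--         {p.get("location", "").lower() for p in properties if p.get("location")},
--         key=len,
--         reverse=True,
--     )
--     for loc in known_locations:
--         if not loc or loc not in t:
--             continue
--         return loc.capitalize() if loc else None
--     return None
-- ===== SOURCE B (Python) =====
-- LOCATION_SYNONYMS = {
--     "jabal amman": "Sweifieh",
--     "rainbow street": "Sweifieh",
--     "rainbow st": "Sweifieh",
--     "jabal": "Sweifieh",
--     "downtown amman": "Abdali",
--     "airport": "Airport Road",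
--     "abdali": "Abdali",
--     "abdoun": "Abdoun",
--     "dabouq": "Dabouq",
--     "sweifieh": "Sweifieh",
--     "khalda": "Khalda",
--     "deir ghbar": "Deir Ghbar",
-- }
--
-- def parse_location_from_text(text: str, properties: list):
--     t = text.lower()
--     for phrase, actual_loc in LOCATION_SYNONYMS.items():
--         if phrase in t:
--             return actual_loc
--     # one linear pass over the properties themselves: keep the longest matching
--     # lowercased location seen so far (strict > keeps the first of equal length)
--     best = None
--     for p in properties:
--         loc = p.get("location", "").lower()
--         if loc and loc in t and (best is None or len(loc) > len(best)):
--             best = loc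
--     return best.capitalize() if best is not None else None
-- ===== Notes on version B (the rewrite author's own statement) =====
-- stated objective: simpler
-- what changed: Phase 2 replaces build-a-set / sort-by-length-descending / take-first-match with one linear pass over the properties list keeping a running longest matching lowercased location (strict > so the first of equal length wins).
-- outside the precondition, e.g. on parse_location_from_text('ab cd', [{'location': 'cd'}, {'location': 'ab'}]): A returns 'Ab', B returns 'Cd'
import Mathlib
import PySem

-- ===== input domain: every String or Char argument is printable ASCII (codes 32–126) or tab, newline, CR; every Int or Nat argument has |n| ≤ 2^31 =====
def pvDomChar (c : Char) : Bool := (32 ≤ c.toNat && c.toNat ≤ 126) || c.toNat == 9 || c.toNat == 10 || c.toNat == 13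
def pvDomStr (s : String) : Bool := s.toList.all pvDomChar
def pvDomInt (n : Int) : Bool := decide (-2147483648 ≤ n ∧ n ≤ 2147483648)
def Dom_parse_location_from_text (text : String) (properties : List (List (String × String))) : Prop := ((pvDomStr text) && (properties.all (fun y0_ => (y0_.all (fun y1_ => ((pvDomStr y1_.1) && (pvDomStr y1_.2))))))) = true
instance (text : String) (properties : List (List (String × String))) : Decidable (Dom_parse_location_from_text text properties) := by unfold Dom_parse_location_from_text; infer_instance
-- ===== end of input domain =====

-- B replaces phase 2's build-set/sort-by-length/first-match with one linear pass keeping the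
-- longest matching location (objective: simpler); return value only, neither version mutates.


-- ===== PORT A =====
-- the module constant LOCATION_SYNONYMS, in dict insertion order
def pvSynonyms : List (String × String) :=
  [("jabal amman", "Sweifieh"), ("rainbow street", "Sweifieh"), ("rainbow st", "Sweifieh"),
   ("jabal", "Sweifieh"), ("downtown amman", "Abdali"), ("airport", "Airport Road"),
   ("abdali", "Abdali"), ("abdoun", "Abdoun"), ("dabouq", "Dabouq"),
   ("sweifieh", "Sweifieh"), ("khalda", "Khalda"), ("deir ghbar", "Deir Ghbar")]

-- Python str.capitalize(), ported by hand (exact on the ASCII domain, where title-case = upper-case)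
def pvCapitalize (s : String) : String :=
  match s.toList with
  | [] => s
  | c :: rest => String.ofList (PySem.Chars.upperChar c :: PySem.Chars.lower rest)

def parse_location_from_text (text : String) (properties : List (List (String × String))) : Option String :=
  let t := PySem.Str.lower text
  match pvSynonyms.find? (fun pr => PySem.Str.isIn pr.1 t) with
  | some pr => some pr.2
  | none =>
    let known := PySem.List.sorted
      (PySem.Set.ofList
        ((properties.filter (fun p => PySem.Dict.getD (PySem.Dict.ofList p) "location" "" != "")).map
          (fun p => PySem.Str.lower (PySem.Dict.getD (PySem.Dict.ofList p) "location" ""))))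
      (fun loc => PySem.Str.len loc) true
    match known.find? (fun loc => !(loc == "") && PySem.Str.isIn loc t) with
    | some loc => if loc == "" then none else some (pvCapitalize loc)
    | none => none

-- ===== PORT B =====
def parse_location_from_text_alt (text : String) (properties : List (List (String × String))) : Option String :=
  let t := PySem.Str.lower text
  match pvSynonyms.find? (fun pr => PySem.Str.isIn pr.1 t) with
  | some pr => some pr.2
  | none =>
    let best := properties.foldl
      (fun best p =>
        let loc := PySem.Str.lower (PySem.Dict.getD (PySem.Dict.ofList p) "location" "")
        if loc != "" && PySem.Str.isIn loc t &&
            (match best with | none => true | some b => decide (PySem.Str.len b < PySem.Str.len loc))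
        then some loc else best)
      none
    match best with
    | some b => some (pvCapitalize b)
    | none => none

-- ===== PRECONDITION & SPEC =====
-- the sequence of lowercased 'location' values, in properties order (used by Pre_ only)
def pvLowerLocs (properties : List (List (String × String))) : List String :=
  properties.map (fun p => PySem.Str.lower (PySem.Dict.getD (PySem.Dict.ofList p) "location" ""))

-- Pre_ excludes inputs where no synonym phrase matches and two DISTINCT equal-length lowercased
-- property locations are both substrings of the lowercased text: there A's answer depends on
-- Python's set-iteration (hash) order, an accident neither implementation should specify.
def Pre_parse_location_from_text (text : String) (properties : List (List (String × String))) : Prop :=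
  (∃ pr ∈ pvSynonyms, PySem.Str.isIn pr.1 (PySem.Str.lower text) = true) ∨
  (∀ l1 ∈ pvLowerLocs properties, ∀ l2 ∈ pvLowerLocs properties,
    PySem.Str.isIn l1 (PySem.Str.lower text) = true →
    PySem.Str.isIn l2 (PySem.Str.lower text) = true →
    PySem.Str.len l1 = PySem.Str.len l2 → l1 = l2)
instance (text : String) (properties : List (List (String × String))) : Decidable (Pre_parse_location_from_text text properties) := by unfold Pre_parse_location_from_text; infer_instance

def pvWitness_parse_location_from_text : String × (List (List (String × String))) :=
  ("nice flat in abdoun", [[("location", "Khalda")]])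

def Spec_parse_location_from_text (text : String) (properties : List (List (String × String))) (out : Option String) : Prop := out = parse_location_from_text_alt text properties
instance (text : String) (properties : List (List (String × String))) (out : Option String) : Decidable (Spec_parse_location_from_text text properties out) := by unfold Spec_parse_location_from_text; infer_instance

-- ===== CLAIM (what is proved, stated in full; the proofs are below) =====
def Claim_equal_parse_location_from_text : Prop := ∀ (text : String) (properties : List (List (String × String))), Dom_parse_location_from_text text properties → Pre_parse_location_from_text text properties → Spec_parse_location_from_text text properties (parse_location_from_text text properties)

-- ===== LEMMAS AND PROOFS =====

-- the match predicate of phase 2 and B's fold step, named for the proofs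
def pvPred (t l : String) : Bool := !(l == "") && PySem.Str.isIn l t

def pvStep (t : String) (b : Option String) (loc : String) : Option String :=
  if (loc != "" && PySem.Str.isIn loc t &&
      (match b with | none => true | some x => decide (PySem.Str.len x < PySem.Str.len loc)))
  then some loc else b

def pvF (p : List (String × String)) : String :=
  PySem.Str.lower (PySem.Dict.getD (PySem.Dict.ofList p) "location" "")

-- B's fold from a some-accumulator: stays some, never shrinks, and is maximal
theorem pvFold_some (t : String) : ∀ (xs : List String) (x : String),
    ∃ m, xs.foldl (pvStep t) (some x) = some m ∧ PySem.Str.len x ≤ PySem.Str.len m ∧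
      (m = x ∨ (m ∈ xs ∧ pvPred t m = true)) ∧
      (∀ l ∈ xs, pvPred t l = true → PySem.Str.len l ≤ PySem.Str.len m) := by
  intro xs
  induction xs with
  | nil => intro x; exact ⟨x, rfl, le_refl _, Or.inl rfl, by simp⟩
  | cons loc xs ih =>
    intro x
    by_cases hc : (loc != "" && PySem.Str.isIn loc t && decide (PySem.Str.len x < PySem.Str.len loc)) = true
    · have hstep : pvStep t (some x) loc = some loc := by simp only [pvStep]; rw [if_pos hc]
      obtain ⟨m, hm, hle, hmem, hmax⟩ := ih loc
      refine ⟨m, by simpa [hstep] using hm, ?_, ?_, ?_⟩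
      · have : PySem.Str.len x < PySem.Str.len loc := by
          simp only [Bool.and_eq_true, decide_eq_true_eq] at hc; exact hc.2
        omega
      · rcases hmem with h | h
        · subst h
          exact Or.inr ⟨List.mem_cons_self, by
            simp only [Bool.and_eq_true] at hc
            simp only [pvPred, Bool.and_eq_true]
            exact ⟨by simpa using hc.1.1, hc.1.2⟩⟩
        · exact Or.inr ⟨List.mem_cons_of_mem _ h.1, h.2⟩
      · intro l hl hpl
        rcases List.mem_cons.mp hl with h | h
        · subst h; exact hle
        · exact hmax l h hpl
    · have hstep : pvStep t (some x) loc = some x := by simp only [pvStep]; rw [if_neg hc]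
      obtain ⟨m, hm, hle, hmem, hmax⟩ := ih x
      refine ⟨m, by simpa [hstep] using hm, hle, ?_, ?_⟩
      · rcases hmem with h | h
        · exact Or.inl h
        · exact Or.inr ⟨List.mem_cons_of_mem _ h.1, h.2⟩
      · intro l hl hpl
        rcases List.mem_cons.mp hl with h | h
        · subst h
          have : ¬ PySem.Str.len x < PySem.Str.len l := by
            intro hlt
            apply hc
            simp only [pvPred, Bool.and_eq_true] at hpl ⊢
            exact ⟨⟨by simpa using hpl.1, hpl.2⟩, by simpa using hlt⟩
          omega
        · exact hmax l h hpl

-- B's fold from none: characterisation of the final accumulator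
theorem pvFold_char (t : String) : ∀ (xs : List String),
    (xs.foldl (pvStep t) none = none ∧ ∀ l ∈ xs, pvPred t l = false) ∨
    (∃ m, xs.foldl (pvStep t) none = some m ∧ m ∈ xs ∧ pvPred t m = true ∧
      ∀ l ∈ xs, pvPred t l = true → PySem.Str.len l ≤ PySem.Str.len m) := by
  intro xs
  induction xs with
  | nil => exact Or.inl ⟨rfl, by simp⟩
  | cons loc xs ih =>
    by_cases hp : pvPred t loc = true
    · have hstep : pvStep t none loc = some loc := by
        simp only [pvStep]
        rw [if_pos]
        simp only [pvPred, Bool.and_eq_true] at hp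
        simp only [Bool.and_eq_true]
        exact ⟨⟨by simpa using hp.1, hp.2⟩, trivial⟩
      obtain ⟨m, hm, hle, hmem, hmax⟩ := pvFold_some t xs loc
      refine Or.inr ⟨m, by simpa [hstep] using hm, ?_, ?_, ?_⟩
      · rcases hmem with h | h
        · subst h; exact List.mem_cons_self
        · exact List.mem_cons_of_mem _ h.1
      · rcases hmem with h | h
        · subst h; exact hp
        · exact h.2
      · intro l hl hpl
        rcases List.mem_cons.mp hl with h | h
        · subst h; exact hle
        · exact hmax l h hpl
    · have hstep : pvStep t none loc = none := by
        simp only [pvStep]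
        rw [if_neg]
        intro hc
        apply hp
        simp only [Bool.and_eq_true] at hc
        simp only [pvPred, Bool.and_eq_true]
        exact ⟨by simpa using hc.1.1, hc.1.2⟩
      rcases ih with ⟨hnone, hall⟩ | ⟨m, hm, hmem, hpm, hmax⟩
      · refine Or.inl ⟨by simpa [hstep] using hnone, ?_⟩
        intro l hl
        rcases List.mem_cons.mp hl with h | h
        · subst h; simpa using hp
        · exact hall l h
      · refine Or.inr ⟨m, by simpa [hstep] using hm, List.mem_cons_of_mem _ hmem, hpm, ?_⟩
        intro l hl hpl
        rcases List.mem_cons.mp hl with h | h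
        · subst h; exact absurd hpl hp
        · exact hmax l h hpl

-- A's find? on a length-descending list: characterisation
theorem pvFind_char (t : String) : ∀ (K : List String),
    K.Pairwise (fun a b => PySem.Str.len b ≤ PySem.Str.len a) →
    (K.find? (fun l => !(l == "") && PySem.Str.isIn l t) = none ∧ ∀ l ∈ K, pvPred t l = false) ∨
    (∃ m, K.find? (fun l => !(l == "") && PySem.Str.isIn l t) = some m ∧ m ∈ K ∧ pvPred t m = true ∧
      ∀ l ∈ K, pvPred t l = true → PySem.Str.len l ≤ PySem.Str.len m) := by
  intro K
  induction K with
  | nil => exact fun _ => Or.inl ⟨rfl, by simp⟩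
  | cons x K ih =>
    intro hpw
    have hpw' := (List.pairwise_cons.mp hpw)
    by_cases hp : pvPred t x = true
    · refine Or.inr ⟨x, ?_, List.mem_cons_self, hp, ?_⟩
      · rw [List.find?_cons_of_pos]
        simpa [pvPred] using hp
      · intro l hl _
        rcases List.mem_cons.mp hl with h | h
        · subst h; exact le_refl _
        · exact hpw'.1 l h
    · have hfind : (x :: K).find? (fun l => !(l == "") && PySem.Str.isIn l t) =
          K.find? (fun l => !(l == "") && PySem.Str.isIn l t) := by
        rw [List.find?_cons_of_neg]
        simpa [pvPred] using hp
      rcases ih hpw'.2 with ⟨hn, hall⟩ | ⟨m, hm, hmem, hpm, hmax⟩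
      · refine Or.inl ⟨by rw [hfind]; exact hn, ?_⟩
        intro l hl
        rcases List.mem_cons.mp hl with h | h
        · subst h; simpa using hp
        · exact hall l h
      · refine Or.inr ⟨m, by rw [hfind]; exact hm, List.mem_cons_of_mem _ hmem, hpm, ?_⟩
        intro l hl hpl
        rcases List.mem_cons.mp hl with h | h
        · subst h; exact absurd hpl hp
        · exact hmax l h hpl

theorem pvLower_empty : PySem.Str.lower "" = "" := by decide

-- ===== VERDICT (by name: the statement is the Claim_ definition above) =====
theorem parse_location_from_text_spec : Claim_equal_parse_location_from_text := by
  intro text properties _hdom hpre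
  unfold Spec_parse_location_from_text parse_location_from_text parse_location_from_text_alt
  simp only []
  cases hsyn : pvSynonyms.find? (fun pr => PySem.Str.isIn pr.1 (PySem.Str.lower text)) with
  | some pr => rfl
  | none =>
    -- names for the proof
    have htie : ∀ l1 ∈ pvLowerLocs properties, ∀ l2 ∈ pvLowerLocs properties,
        PySem.Str.isIn l1 (PySem.Str.lower text) = true →
        PySem.Str.isIn l2 (PySem.Str.lower text) = true →
        PySem.Str.len l1 = PySem.Str.len l2 → l1 = l2 := by
      rcases hpre with hs | h
      · exfalso
        obtain ⟨pr, hmem, hin⟩ := hs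
        have := List.find?_eq_none.mp hsyn pr hmem
        simp only [PySem.Str.isIn_eq, PySem.Str.toList_lower] at hin
        apply this
        simp only [PySem.Str.isIn_eq, PySem.Str.toList_lower]
        exact hin
      · exact h
    -- B's fold over properties is the fold of pvStep over the lowered locations
    have hfold : properties.foldl
        (fun best p =>
          let loc := PySem.Str.lower (PySem.Dict.getD (PySem.Dict.ofList p) "location" "")
          if (loc != "" && PySem.Str.isIn loc (PySem.Str.lower text) &&
              (match best with | none => true | some b => decide (PySem.Str.len b < PySem.Str.len loc)))
          then some loc else best) none
        = (pvLowerLocs properties).foldl (pvStep (PySem.Str.lower text)) none := by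
      unfold pvLowerLocs
      rw [List.foldl_map]
      rfl
    -- the sorted list of A's phase 2
    have hpw := PySem.List.sorted_pairwise_rev
      (PySem.Set.ofList
        ((properties.filter (fun p => PySem.Dict.getD (PySem.Dict.ofList p) "location" "" != "")).map
          (fun p => PySem.Str.lower (PySem.Dict.getD (PySem.Dict.ofList p) "location" ""))))
      (fun loc => PySem.Str.len loc)
    set K := PySem.List.sorted
      (PySem.Set.ofList
        ((properties.filter (fun p => PySem.Dict.getD (PySem.Dict.ofList p) "location" "" != "")).map
          (fun p => PySem.Str.lower (PySem.Dict.getD (PySem.Dict.ofList p) "location" ""))))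
      (fun loc => PySem.Str.len loc) true with hKdef
    -- membership transfer between K and the lowered locations
    have hKL : ∀ l, l ∈ K → l ∈ pvLowerLocs properties := by
      intro l hl
      rw [hKdef, PySem.List.mem_sorted, PySem.Set.mem_ofList] at hl
      obtain ⟨p, hp, hfp⟩ := List.mem_map.mp hl
      exact List.mem_map.mpr ⟨p, (List.mem_filter.mp hp).1, hfp⟩
    have hLK : ∀ l, l ∈ pvLowerLocs properties → pvPred (PySem.Str.lower text) l = true → l ∈ K := by
      intro l hl hpl
      obtain ⟨p, hp, hfp⟩ := List.mem_map.mp hl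
      have hne : l ≠ "" := by
        simp only [pvPred, Bool.and_eq_true] at hpl
        simpa using hpl.1
      have hq : (PySem.Dict.getD (PySem.Dict.ofList p) "location" "" != "") = true := by
        rw [bne_iff_ne, ne_eq]
        intro h0
        apply hne
        rw [← hfp, h0]
        exact pvLower_empty
      rw [hKdef, PySem.List.mem_sorted, PySem.Set.mem_ofList]
      exact List.mem_map.mpr ⟨p, List.mem_filter.mpr ⟨hp, hq⟩, hfp⟩
    rw [hfold]
    rcases pvFind_char (PySem.Str.lower text) K hpw with ⟨hfA, hallA⟩ | ⟨mA, hfA, hmemA, hpA, hmaxA⟩ <;>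
      rcases pvFold_char (PySem.Str.lower text) (pvLowerLocs properties) with ⟨hfB, hallB⟩ | ⟨mB, hfB, hmemB, hpB, hmaxB⟩
    · rw [hfA, hfB]
    · exfalso
      have := hallA mB (hLK mB hmemB hpB)
      rw [hpB] at this
      exact Bool.true_eq_false.mp this
    · exfalso
      have := hallB mA (hKL mA hmemA)
      rw [hpA] at this
      exact Bool.true_eq_false.mp this
    · rw [hfA, hfB]
      have hAB : mA = mB := by
        have h1 : PySem.Str.len mA ≤ PySem.Str.len mB := hmaxB mA (hKL mA hmemA) hpA
        have h2 : PySem.Str.len mB ≤ PySem.Str.len mA := hmaxA mB (hLK mB hmemB hpB) hpB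
        have hinA : PySem.Str.isIn mA (PySem.Str.lower text) = true := by
          simp only [pvPred, Bool.and_eq_true] at hpA; exact hpA.2
        have hinB : PySem.Str.isIn mB (PySem.Str.lower text) = true := by
          simp only [pvPred, Bool.and_eq_true] at hpB; exact hpB.2
        exact htie mA (hKL mA hmemA) mB hmemB hinA hinB (le_antisymm h1 h2)
      have hne : (mA == "") = false := by
        simp only [pvPred, Bool.and_eq_true] at hpA
        simpa using hpA.1
      subst hAB
      simp [hne]
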